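-- pv_equiv track=rewrite | github.com/Chiuliana/CS_Laboratory_works | Labs/Lab_1_Caesar's_cipher/task_1.2..py | caesar_cipher_with_two_keys
-- ===== SOURCE A (Python) =====
-- def generate_permuted_alphabet(keyword):
--     keyword = keyword.upper()
--     alphabet = "ABCDEFGHIJKLMNOPQRSTUVWXYZ"
--
--     # Create a set of unique characters from the keyword
--     unique_chars = []
--     for char in keyword:
--         if char not in unique_chars and char in alphabet:
--             unique_chars.append(char)
--
--     # Create the permuted alphabet
--     for char in alphabet:
--         if char not in unique_chars:
--             unique_chars.append(char)
--
--     return ''.join(unique_chars)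
--
-- def caesar_cipher_with_two_keys(text, key1, key2, mode='encrypt'):
--     # Generate the permuted alphabet from key2
--     permuted_alphabet = generate_permuted_alphabet(key2)
--
--     result = ""
--     text = text.upper().replace(" ", "").strip()  # Normalize input text
--
--     for char in text:
--         if char in permuted_alphabet:  # Only process valid characters
--             idx = permuted_alphabet.index(char)
--             if mode == 'encrypt':
--                 new_idx = (idx + key1) % 26  # Encryption formula
--             else:
--                 new_idx = (idx - key1) % 26  # Decryption formula
--             result += permuted_alphabet[new_idx]
--         else:
--             result += char  # Keep non-alphabet characters unchanged
--
--     return result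
-- ===== SOURCE B (Python) =====
-- def caesar_cipher_with_two_keys(text, key1, key2, mode='encrypt'):
--     # Letter-major rewrite: instead of scanning the permuted alphabet for every
--     # character of the text, walk the 26 cipher-alphabet letters once and, for
--     # each, overwrite every position of the text that holds that letter with its
--     # shifted image.  Positions holding no alphabet letter are never touched.
--     alphabet = "ABCDEFGHIJKLMNOPQRSTUVWXYZ"
--     # keyword-permuted alphabet: first occurrences of the keyword's letters,
--     # then the remaining letters in alphabetical order
--     perm = "".join(dict.fromkeys(c for c in key2.upper() + alphabet if c in alphabet))
--     d = key1 if mode == 'encrypt' else -key1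
--     s = text.upper().replace(" ", "").strip()
--     out = list(s)
--     for i in range(26):
--         image = perm[(i + d) % 26]
--         for pos in range(len(s)):
--             if s[pos] == perm[i]:
--                 out[pos] = image
--     return "".join(out)
-- ===== Notes on version B (the rewrite author's own statement) =====
-- stated objective: alternative
-- what changed: B transposes the loops: it builds the permuted alphabet with the dict.fromkeys dedup idiom, then iterates letter-major over the 26 cipher-alphabet letters, overwriting every text position holding that letter with its shifted image, instead of A's character-major pass that scans the alphabet for membership and .index and does modular arithmetic per text character.
import Mathlib
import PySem

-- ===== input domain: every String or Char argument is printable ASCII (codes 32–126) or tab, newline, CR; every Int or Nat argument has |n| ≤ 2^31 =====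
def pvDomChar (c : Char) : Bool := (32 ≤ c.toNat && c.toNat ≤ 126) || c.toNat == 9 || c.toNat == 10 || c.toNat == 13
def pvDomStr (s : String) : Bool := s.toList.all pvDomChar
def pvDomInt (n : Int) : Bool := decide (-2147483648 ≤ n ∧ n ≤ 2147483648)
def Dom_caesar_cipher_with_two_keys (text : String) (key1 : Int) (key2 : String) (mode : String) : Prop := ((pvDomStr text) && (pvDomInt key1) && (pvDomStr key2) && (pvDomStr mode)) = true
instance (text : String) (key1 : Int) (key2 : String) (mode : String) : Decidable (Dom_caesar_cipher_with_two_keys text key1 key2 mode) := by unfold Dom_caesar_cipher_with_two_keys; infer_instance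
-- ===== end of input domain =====

-- B transposes the loops: instead of A's character-major pass (membership scan,
-- .index scan and modular arithmetic per text character), B walks the 26 letters
-- of the keyword-permuted alphabet (built by the dict.fromkeys dedup idiom) and,
-- for each letter, overwrites every text position holding it with its shifted
-- image; untouched positions keep their characters (objective: alternative).

-- ===== PORT A =====
-- the 26-letter alphabet literal both Pythons use
def pvAlphaL : List Char := "ABCDEFGHIJKLMNOPQRSTUVWXYZ".toList

-- module helper of Source A; 'c in <string>' for a single character is list
-- membership, ''.join of single characters is String.ofList
def generate_permuted_alphabet (keyword : String) : String :=
  let kw := PySem.Chars.upper keyword.toList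
  let u1 := kw.foldl (fun acc c => if c ∉ acc ∧ c ∈ pvAlphaL then acc ++ [c] else acc) []
  let u2 := pvAlphaL.foldl (fun acc c => if c ∉ acc then acc ++ [c] else acc) u1
  String.ofList u2

def caesar_cipher_with_two_keys (text : String) (key1 : Int) (key2 : String) (mode : String) : String :=
  let perm := (generate_permuted_alphabet key2).toList
  let t := PySem.Chars.strip (PySem.Chars.replace (PySem.Chars.upper text.toList) [' '] [])
  let res := t.foldl (fun (r : List Char) c =>
    if c ∈ perm then
      -- str.index of a single character guarded by membership: first index, exact
      let idx : Int := ((PySem.List.index? perm c).getD 0 : Nat)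
      let newIdx := if mode == "encrypt" then PySem.Int.mod (idx + key1) 26
                    else PySem.Int.mod (idx - key1) 26
      -- 0 ≤ newIdx < 26 = len(perm) (proved below), so the Python index never raises
      r ++ [(PySem.List.pyGet? perm newIdx).getD c]
    else r ++ [c]) []
  String.ofList res

-- ===== PORT B =====
-- ''.join(dict.fromkeys(c for c in key2.upper() + alphabet if c in alphabet)):
-- first-occurrence dedup of the filtered concatenation (dict.fromkeys = PySem.List.dedup)
def pvPermB (key2 : String) : List Char :=
  PySem.List.dedup ((PySem.Chars.upper key2.toList ++ pvAlphaL).filter (fun c => decide (c ∈ pvAlphaL)))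

-- the inner loop of Source B: 'for pos in range(len(s)): if s[pos] == plain: out[pos] = image'
-- (indices produced by range are in bounds, so the total pyGetD/pySetD forms are exact)
def pvInner (s : List Char) (plain image : Char) (out : List Char) : List Char :=
  (PySem.List.pyRange 0 (s.length : Int) 1).foldl (fun out pos =>
    if PySem.List.pyGetD s pos ' ' == plain then PySem.List.pySetD out pos image else out) out

def caesar_cipher_with_two_keys_alt (text : String) (key1 : Int) (key2 : String) (mode : String) : String :=
  let perm := pvPermB key2
  let d : Int := if mode == "encrypt" then key1 else -key1
  let s := PySem.Chars.strip (PySem.Chars.replace (PySem.Chars.upper text.toList) [' '] [])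
  -- out = list(s); for i in range(26): image = perm[(i+d) % 26]; <inner loop>
  -- (0 ≤ (i+d) % 26 < 26 = len(perm), proved below, so perm[…] never raises)
  let out := (PySem.List.pyRange 0 26 1).foldl (fun out i =>
    pvInner s (PySem.List.pyGetD perm i ' ')
      (PySem.List.pyGetD perm (PySem.Int.mod (i + d) 26) ' ') out) s
  String.ofList out

-- ===== PRECONDITION & SPEC =====
def Spec_caesar_cipher_with_two_keys (text : String) (key1 : Int) (key2 : String) (mode : String) (out : String) : Prop := out = caesar_cipher_with_two_keys_alt text key1 key2 mode
instance (text : String) (key1 : Int) (key2 : String) (mode : String) (out : String) : Decidable (Spec_caesar_cipher_with_two_keys text key1 key2 mode out) := by unfold Spec_caesar_cipher_with_two_keys; infer_instance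

-- ===== CLAIM (what is proved, stated in full; the proofs are below) =====
def Claim_equal_caesar_cipher_with_two_keys : Prop := ∀ (text : String) (key1 : Int) (key2 : String) (mode : String), Dom_caesar_cipher_with_two_keys text key1 key2 mode → Spec_caesar_cipher_with_two_keys text key1 key2 mode (caesar_cipher_with_two_keys text key1 key2 mode)

-- ===== LEMMAS AND PROOFS =====

-- folding Set.add over a filtered list is A's filtered dedup fold over the raw list
theorem dedup_filter_fold (P : List Char) (l : List Char) (acc : List Char) :
    (l.filter (fun c => decide (c ∈ P))).foldl PySem.Set.add acc =
      l.foldl (fun acc c => if c ∉ acc ∧ c ∈ P then acc ++ [c] else acc) acc := by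
  induction l generalizing acc with
  | nil => rfl
  | cons c l ih =>
      by_cases hp : c ∈ P
      · rw [List.filter_cons_of_pos (by simpa using hp), List.foldl_cons, List.foldl_cons]
        by_cases hc : c ∈ acc
        · rw [if_neg (by tauto), show PySem.Set.add acc c = acc from by
            simp [PySem.Set.add, hc], ih]
        · rw [if_pos ⟨hc, hp⟩, show PySem.Set.add acc c = acc ++ [c] from by
            simp [PySem.Set.add, hc], ih]
      · rw [List.filter_cons_of_neg (by simpa using hp), List.foldl_cons,
          if_neg (by tauto), ih]

-- A's permuted alphabet is B's
theorem perm_eq (key2 : String) : (generate_permuted_alphabet key2).toList = pvPermB key2 := by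
  unfold generate_permuted_alphabet pvPermB PySem.List.dedup PySem.Set.ofList
  simp only [String.toList_ofList]
  rw [List.filter_append, List.foldl_append, dedup_filter_fold, dedup_filter_fold]
  exact (PySem.List.foldl_congr_mem pvAlphaL _ _ _ (fun acc c hc => by
    by_cases h : c ∈ acc <;> simp [h, hc])).symm

-- the permuted alphabet: duplicate-free, all in the alphabet, 26 letters
theorem perm_facts (key2 : String) :
    (pvPermB key2).Nodup ∧ (∀ x ∈ pvPermB key2, x ∈ pvAlphaL) ∧ (pvPermB key2).length = 26 := by
  unfold pvPermB
  refine ⟨PySem.List.nodup_dedup _, ?_, ?_⟩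
  · intro x hx
    rw [PySem.List.mem_dedup] at hx
    simpa using (List.mem_filter.1 hx).2
  · have halpha : pvAlphaL.Nodup := by decide
    have hmem : ∀ x, x ∈ PySem.List.dedup ((PySem.Chars.upper key2.toList ++ pvAlphaL).filter
        (fun c => decide (c ∈ pvAlphaL))) ↔ x ∈ pvAlphaL := by
      intro x
      rw [PySem.List.mem_dedup, List.mem_filter]
      simp only [List.mem_append, decide_eq_true_eq]
      tauto
    have hperm := (List.perm_ext_iff_of_nodup (PySem.List.nodup_dedup _) halpha).2 hmem
    simpa using hperm.length_eq

-- in a duplicate-free list, index? of the m-th element is m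
theorem index?_getElem {L : List Char} (hnd : L.Nodup) (m : Nat) (hm : m < L.length) :
    PySem.List.index? L L[m] = some m := by
  induction L generalizing m with
  | nil => simp at hm
  | cons x xs ih =>
      cases m with
      | zero => exact PySem.List.index?_cons_self x xs
      | succ m =>
          have hm' : m < xs.length := by simpa using hm
          have hx : x ≠ xs[m] := fun h => (List.nodup_cons.1 hnd).1 (h ▸ xs.getElem_mem hm')
          rw [show (x :: xs)[m + 1] = xs[m] from rfl,
            PySem.List.index?_cons_of_ne xs hx, ih (List.nodup_cons.1 hnd).2 m hm']
          rfl

-- the explicit Nat form of Source B's inner loop: what each position holds afterwards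
theorem set_fold_getD (s : List Char) (plain image : Char) (n : Nat) (out : List Char)
    (hn : n ≤ s.length) (hlen : s.length ≤ out.length) :
    (((List.range n).foldl (fun o pos => if s.getD pos ' ' == plain then o.set pos image else o) out).length = out.length) ∧
    ∀ q : Nat, ((List.range n).foldl (fun o pos => if s.getD pos ' ' == plain then o.set pos image else o) out).getD q ' ' =
      if q < n ∧ s.getD q ' ' = plain then image else out.getD q ' ' := by
  induction n with
  | zero => simp
  | succ n ih =>
      obtain ⟨ihl, ihq⟩ := ih (by omega)
      rw [List.range_succ, List.foldl_append, List.foldl_cons, List.foldl_nil]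
      set F := (List.range n).foldl
        (fun o pos => if s.getD pos ' ' == plain then o.set pos image else o) out with hF
      constructor
      · split
        · simpa using ihl
        · exact ihl
      · intro q
        by_cases hp : s.getD n ' ' = plain
        · rw [if_pos (by simpa using hp)]
          rw [List.getD_eq_getElem?_getD, List.getElem?_set]
          by_cases hq : q = n
          · subst hq
            rw [if_pos rfl, if_pos (show q < F.length by rw [ihl]; omega),
              if_pos ⟨by omega, by simpa using hp⟩]
            rfl
          · rw [if_neg (Ne.symm hq), ← List.getD_eq_getElem?_getD, ihq]
            by_cases h2 : q < n ∧ s.getD q ' ' = plain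
            · rw [if_pos h2, if_pos ⟨by omega, h2.2⟩]
            · rw [if_neg h2, if_neg (by rintro ⟨h3, h4⟩; exact h2 ⟨by omega, h4⟩)]
        · rw [if_neg (by simpa using hp), ihq]
          by_cases h2 : q < n ∧ s.getD q ' ' = plain
          · rw [if_pos h2, if_pos ⟨by omega, h2.2⟩]
          · rw [if_neg h2, if_neg (by
              rintro ⟨h3, h4⟩
              -- q = n would force s.getD q ' ' = plain, excluded by hp
              rcases Nat.lt_succ_iff_lt_or_eq.1 h3 with h3 | rfl
              · exact h2 ⟨h3, h4⟩
              · exact hp h4)]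

-- pvInner in terms of the Nat fold above
theorem pvInner_eq (s : List Char) (plain image : Char) (out : List Char) :
    pvInner s plain image out =
      (List.range s.length).foldl (fun o pos => if s.getD pos ' ' == plain then o.set pos image else o) out := by
  unfold pvInner
  rw [PySem.List.pyRange_zero_nat, List.foldl_map]
  simp

-- the outer loop of Source B, position by position: processed letters are substituted
theorem outer_getD (key2 : String) (s : List Char) (img : Nat → Char)
    (hsp : ' ' ∉ pvPermB key2) (m : Nat) (hm : m ≤ 26) :
    (((List.range m).foldl (fun out i =>
        pvInner s ((pvPermB key2).getD i ' ') (img i) out) s).length = s.length) ∧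
    ∀ q : Nat, ((List.range m).foldl (fun out i =>
        pvInner s ((pvPermB key2).getD i ' ') (img i) out) s).getD q ' ' =
      match PySem.List.index? (pvPermB key2) (s.getD q ' ') with
      | some i => if i < m then img i else s.getD q ' '
      | none => s.getD q ' ' := by
  obtain ⟨hnd, hsub, hlen⟩ := perm_facts key2
  induction m with
  | zero =>
      refine ⟨rfl, fun q => ?_⟩
      cases PySem.List.index? (pvPermB key2) (s.getD q ' ') <;> simp
  | succ m ih =>
      obtain ⟨ihl, ihq⟩ := ih (by omega)
      rw [List.range_succ, List.foldl_append, List.foldl_cons, List.foldl_nil,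
        pvInner_eq]
      obtain ⟨hl2, hq2⟩ := set_fold_getD s ((pvPermB key2).getD m ' ') (img m) s.length _
        le_rfl (le_of_eq ihl.symm)
      refine ⟨by rw [hl2, ihl], fun q => ?_⟩
      rw [hq2 q]
      have hm26 : m < (pvPermB key2).length := by omega
      have hgm : (pvPermB key2).getD m ' ' = (pvPermB key2)[m] := List.getD_eq_getElem _ _ hm26
      by_cases hpm : s.getD q ' ' = (pvPermB key2).getD m ' '
      · have hqlt : q < s.length := by
          by_contra h
          rw [List.getD_eq_default _ _ (by omega)] at hpm
          exact hsp (hpm ▸ hgm ▸ ((pvPermB key2).getElem_mem hm26))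
        rw [if_pos ⟨hqlt, hpm⟩, hpm, hgm, index?_getElem hnd m hm26]
        show img m = if m < m + 1 then img m else (pvPermB key2)[m]
        rw [if_pos (by omega)]
      · rw [if_neg (by rintro ⟨h1, h2⟩; exact hpm h2), ihq q]
        cases hidx : PySem.List.index? (pvPermB key2) (s.getD q ' ') with
        | none => rfl
        | some i =>
            obtain ⟨hi, hiv, -⟩ := PySem.List.getElem_of_index?_eq_some hidx
            have him : i ≠ m := by rintro rfl; exact hpm (by rw [hgm]; exact hiv.symm)
            show (if i < m then img i else s.getD q ' ') =
              if i < m + 1 then img i else s.getD q ' '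
            by_cases hlt : i < m
            · rw [if_pos hlt, if_pos (by omega)]
            · rw [if_neg hlt, if_neg (by omega)]

-- per character: B's substituted letter is A's membership/.index/mod computation
theorem char_eq (key2 : String) (key1 : Int) (mode : String) (c : Char) :
    (match PySem.List.index? (pvPermB key2) c with
      | some i => if i < 26 then
          PySem.List.pyGetD (pvPermB key2)
            (PySem.Int.mod ((i : Int) + (if mode == "encrypt" then key1 else -key1)) 26) ' '
        else c
      | none => c) =
    (if c ∈ pvPermB key2 then
      (PySem.List.pyGet? (pvPermB key2)
        (if mode == "encrypt" then
          PySem.Int.mod (((PySem.List.index? (pvPermB key2) c).getD 0 : Nat) + key1) 26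
         else PySem.Int.mod (((PySem.List.index? (pvPermB key2) c).getD 0 : Nat) - key1) 26)).getD c
     else c) := by
  obtain ⟨hnd, hsub, hlen⟩ := perm_facts key2
  cases hidx : PySem.List.index? (pvPermB key2) c with
  | none => rw [if_neg ((PySem.List.index?_eq_none_iff _ c).1 hidx)]
  | some i =>
      obtain ⟨hi, hiv, -⟩ := PySem.List.getElem_of_index?_eq_some hidx
      have hmem : c ∈ pvPermB key2 := hiv ▸ (pvPermB key2).getElem_mem hi
      rw [if_pos hmem]
      show (if i < 26 then _ else c) = _
      rw [if_pos (show i < 26 by omega)]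
      simp only [Option.getD_some]
      have key : ∀ e : Int, 0 ≤ e → e < 26 →
          PySem.List.pyGetD (pvPermB key2) e ' ' =
            (PySem.List.pyGet? (pvPermB key2) e).getD c := by
        intro e he1 he2
        have hsome : PySem.List.pyGet? (pvPermB key2) e = (pvPermB key2)[e.toNat]? := by
          rw [← PySem.List.pyGet?_natCast (pvPermB key2) e.toNat,
            show ((e.toNat : Nat) : Int) = e from by omega]
        rw [PySem.List.pyGetD_eq_getElem (pvPermB key2) ' ' he1 (by omega), hsome,
          List.getElem?_eq_getElem (by omega)]
        rfl
      by_cases hmode : (mode == "encrypt") = true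
      · rw [if_pos hmode, if_pos hmode,
          key _ (PySem.Int.mod_nonneg _ (by norm_num)) (PySem.Int.mod_lt _ (by norm_num))]
      · rw [if_neg hmode, if_neg hmode,
          show (i : Int) + -key1 = (i : Int) - key1 from by ring,
          key _ (PySem.Int.mod_nonneg _ (by norm_num)) (PySem.Int.mod_lt _ (by norm_num))]

-- ===== VERDICT (by name: the statement is the Claim_ definition above) =====
theorem caesar_cipher_with_two_keys_spec : Claim_equal_caesar_cipher_with_two_keys := by
  intro text key1 key2 mode _
  unfold Spec_caesar_cipher_with_two_keys caesar_cipher_with_two_keys caesar_cipher_with_two_keys_alt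
  dsimp only
  rw [perm_eq]
  obtain ⟨hnd, hsub, hlen⟩ := perm_facts key2
  have hsp : ' ' ∉ pvPermB key2 := fun h => by have := hsub ' ' h; revert this; decide
  set s := PySem.Chars.strip (PySem.Chars.replace (PySem.Chars.upper text.toList) [' '] []) with hs
  clear_value s
  -- A's append-only loop is a map over the normalized text
  rw [show (fun (r : List Char) c =>
      if c ∈ (pvPermB key2) then
        let idx : Int := ((PySem.List.index? (pvPermB key2) c).getD 0 : Nat)
        let newIdx := if mode == "encrypt" then PySem.Int.mod (idx + key1) 26
                      else PySem.Int.mod (idx - key1) 26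
        r ++ [(PySem.List.pyGet? (pvPermB key2) newIdx).getD c]
      else r ++ [c]) = fun (r : List Char) c => r ++ [(fun c =>
        if c ∈ (pvPermB key2) then
          (PySem.List.pyGet? (pvPermB key2)
            (if mode == "encrypt" then
              PySem.Int.mod (((PySem.List.index? (pvPermB key2) c).getD 0 : Nat) + key1) 26
             else PySem.Int.mod (((PySem.List.index? (pvPermB key2) c).getD 0 : Nat) - key1) 26)).getD c
        else c) c] from funext₂ (fun r c => by by_cases h : c ∈ (pvPermB key2) <;> simp [h]),
    PySem.List.foldl_append_singleton_eq_map, List.nil_append]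
  -- B's outer loop, in Nat form
  rw [show (PySem.List.pyRange 0 26 1).foldl (fun out i =>
      pvInner s (PySem.List.pyGetD (pvPermB key2) i ' ')
        (PySem.List.pyGetD (pvPermB key2)
          (PySem.Int.mod (i + (if mode == "encrypt" then key1 else -key1)) 26) ' ') out) s =
      (List.range 26).foldl (fun out i =>
        pvInner s ((pvPermB key2).getD i ' ')
          (PySem.List.pyGetD (pvPermB key2)
            (PySem.Int.mod ((i : Int) + (if mode == "encrypt" then key1 else -key1)) 26) ' ') out) s from by
    rw [show (26 : Int) = ((26 : Nat) : Int) from rfl, PySem.List.pyRange_zero_nat,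
      List.foldl_map]
    simp]
  obtain ⟨hOl, hOq⟩ := outer_getD key2 s
    (fun i => PySem.List.pyGetD (pvPermB key2)
      (PySem.Int.mod ((i : Int) + (if mode == "encrypt" then key1 else -key1)) 26) ' ') hsp 26 le_rfl
  refine congrArg String.ofList (List.ext_getElem (by rw [hOl, List.length_map]) (fun q hq1 hq2 => ?_))
  rw [List.length_map] at hq1
  have hgq : _ = _ := hOq q
  rw [List.getD_eq_getElem _ ' ' hq2, List.getD_eq_getElem _ ' ' hq1] at hgq
  rw [hgq, List.getElem_map]
  exact (char_eq key2 key1 mode s[q]).symm
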